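-- pv_equiv track=rewrite | github.com/FreeRiverHouse/Onde | scripts/analyze-streak-position.py | analyze_by_streak_position
-- ===== SOURCE A (Python) =====
-- from collections import defaultdict
--
-- def analyze_by_streak_position(trades):
--     """
--     Analyze win rate by position within a streak.
--
--     Position 0 = start of new streak (after opposite outcome)
--     Position 1 = 2nd trade in streak direction
--     Position 2+ = deep in streak
--     """
--     if not trades:
--         return {}
--
--     # Track win rate by position in win streak
--     win_streak_positions = defaultdict(lambda: {'wins': 0, 'losses': 0})
--     # Track win rate by position in loss streak
--     loss_streak_positions = defaultdict(lambda: {'wins': 0, 'losses': 0})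
--     # Track win rate after streak end
--     after_streak_stats = defaultdict(lambda: {'wins': 0, 'losses': 0})
--
--     current_streak = 0  # positive = wins, negative = losses
--
--     for trade in trades:
--         won = trade['result_status'] == 'won'
--
--         # Determine position context
--         if current_streak > 0:
--             # We were on a win streak, this trade follows wins
--             position = min(current_streak, 5)  # Cap at 5+ for grouping
--             key = f"after_{position}_wins"
--             if won:
--                 after_streak_stats[key]['wins'] += 1
--             else:
--                 after_streak_stats[key]['losses'] += 1
--         elif current_streak < 0:
--             # We were on a loss streak, this trade follows losses
--             position = min(abs(current_streak), 5)
--             key = f"after_{position}_losses"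
--             if won:
--                 after_streak_stats[key]['wins'] += 1
--             else:
--                 after_streak_stats[key]['losses'] += 1
--         else:
--             # First trade or streak just ended
--             if won:
--                 after_streak_stats['first_trade']['wins'] += 1
--             else:
--                 after_streak_stats['first_trade']['losses'] += 1
--
--         # Update streak
--         if won:
--             if current_streak > 0:
--                 current_streak += 1
--             else:
--                 current_streak = 1  # New win streak
--         else:
--             if current_streak < 0:
--                 current_streak -= 1
--             else:
--                 current_streak = -1  # New loss streak
--
--     return after_streak_stats
-- ===== SOURCE B (Python) =====
-- def analyze_by_streak_position(trades):
--     """Run-based re-implementation: split trades into maximal runs of equal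
--     outcome with two pointers, then bucket each run's first trade by the
--     previous run and the rest by their position within the run."""
--     stats = {}
--
--     def bump(key, won):
--         rec = stats.setdefault(key, {'wins': 0, 'losses': 0})
--         rec['wins' if won else 'losses'] += 1
--
--     n = len(trades)
--     i = 0
--     prev = None  # (won, length) of the previous run
--     while i < n:
--         won = trades[i]['result_status'] == 'won'
--         j = i + 1
--         while j < n and (trades[j]['result_status'] == 'won') == won:
--             j += 1
--         length = j - i
--         if prev is None:
--             bump('first_trade', won)
--         else:
--             pw, pl = prev
--             bump("after_%d_%s" % (min(pl, 5), 'wins' if pw else 'losses'), won)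
--         for k in range(1, length):
--             bump("after_%d_%s" % (min(k, 5), 'wins' if won else 'losses'), won)
--         prev = (won, length)
--         i = j
--     return stats
-- ===== Notes on version B (the rewrite author's own statement) =====
-- stated objective: alternative
-- what changed: B first segments the trade list into maximal runs of equal outcome with a two-pointer scan and buckets each run's first trade by the previous run and the later trades by their position inside the run, instead of A's single fold over a signed streak counter.
import Mathlib
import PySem

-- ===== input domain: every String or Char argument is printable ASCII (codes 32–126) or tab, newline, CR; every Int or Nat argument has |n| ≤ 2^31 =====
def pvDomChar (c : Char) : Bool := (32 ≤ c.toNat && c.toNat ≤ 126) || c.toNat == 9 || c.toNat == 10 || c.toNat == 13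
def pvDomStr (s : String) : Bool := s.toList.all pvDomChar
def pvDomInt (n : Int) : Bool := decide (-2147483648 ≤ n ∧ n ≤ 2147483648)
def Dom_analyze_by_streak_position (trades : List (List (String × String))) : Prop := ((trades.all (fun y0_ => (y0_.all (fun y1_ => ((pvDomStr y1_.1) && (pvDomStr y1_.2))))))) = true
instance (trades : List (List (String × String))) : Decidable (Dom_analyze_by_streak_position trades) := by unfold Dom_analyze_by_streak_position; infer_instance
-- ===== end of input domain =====

-- B replaces A's single fold over a signed streak counter by a run-segmentation pass
-- (maximal runs of equal outcome) with per-run bucketing; same O(n) cost (objective: alternative).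
-- Equivalence is about the return value; neither program mutates its argument.

-- shared dict primitives (the Python dict-of-{'wins','losses'} shape, used by both ports)
def pvRes (t : List (String × String)) : String := (PySem.Dict.mk t).getD "result_status" ""
def pvWon (t : List (String × String)) : Bool := pvRes t == "won"
def pvKey (w : Bool) (p : Int) : String := "after_" ++ PySem.Int.toStr p ++ (if w then "_wins" else "_losses")
def pvBump (d : PySem.Dict String (Int × Int)) (k : String) (w : Bool) : PySem.Dict String (Int × Int) :=
  d.modify k (0, 0) (fun v => if w then (v.1 + 1, v.2) else (v.1, v.2 + 1))
def pvRender (d : PySem.Dict String (Int × Int)) : List (String × List (String × Int)) :=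
  d.items.map (fun p => (p.1, [("wins", p.2.1), ("losses", p.2.2)]))

-- ===== PORT A =====
def pvStepA (st : PySem.Dict String (Int × Int) × Int) (t : List (String × String)) :
    PySem.Dict String (Int × Int) × Int :=
  let won := pvWon t
  let s := st.2
  let d :=
    if s > 0 then pvBump st.1 (pvKey true (min s 5)) won
    else if s < 0 then pvBump st.1 (pvKey false (min |s| 5)) won
    else pvBump st.1 "first_trade" won
  let s' := if won then (if s > 0 then s + 1 else 1) else (if s < 0 then s - 1 else -1)
  (d, s')

def analyze_by_streak_position (trades : List (List (String × String))) : List (String × List (String × Int)) :=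
  if trades = [] then []
  else pvRender (trades.foldl pvStepA (PySem.Dict.empty, 0)).1

-- ===== PORT B =====
def pvRunLen (w : Bool) (rest : List (List (String × String))) : Nat :=
  (rest.takeWhile (fun t => pvWon t == w)).length

def pvBLoop : Option (Bool × Int) → List (List (String × String)) → PySem.Dict String (Int × Int) → PySem.Dict String (Int × Int)
  | _, [], d => d
  | prev, t :: rest, d =>
    let won := pvWon t
    let k := pvRunLen won rest
    let len : Int := 1 + (k : Int)
    let d1 := match prev with
      | none => pvBump d "first_trade" won
      | some (pw, pl) => pvBump d (pvKey pw (min pl 5)) won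
    let d2 := (PySem.List.pyRange 1 len 1).foldl (fun d j => pvBump d (pvKey won (min j 5)) won) d1
    pvBLoop (some (won, len)) (rest.drop k) d2
termination_by _ ts _ => ts.length
decreasing_by simp [List.length_drop]

def analyze_by_streak_position_alt (trades : List (List (String × String))) : List (String × List (String × Int)) :=
  pvRender (pvBLoop none trades PySem.Dict.empty)

-- ===== PRECONDITION & SPEC =====
-- Pre_ excludes exactly the inputs where the Python A raises KeyError: a trade dict lacking 'result_status'.
def Pre_analyze_by_streak_position (trades : List (List (String × String))) : Prop :=
  (trades.all (fun t => t.any (fun p => p.1 == "result_status"))) = true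
instance (trades : List (List (String × String))) : Decidable (Pre_analyze_by_streak_position trades) := by
  unfold Pre_analyze_by_streak_position; infer_instance
def pvWitness_analyze_by_streak_position : (List (List (String × String))) :=
  [[("result_status", "won")], [("result_status", "lost")]]

def Spec_analyze_by_streak_position (trades : List (List (String × String))) (out : List (String × List (String × Int))) : Prop := out = analyze_by_streak_position_alt trades
instance (trades : List (List (String × String))) (out : List (String × List (String × Int))) : Decidable (Spec_analyze_by_streak_position trades out) := by unfold Spec_analyze_by_streak_position; infer_instance

-- ===== CLAIM (what is proved, stated in full; the proofs are below) =====
def Claim_equal_analyze_by_streak_position : Prop := ∀ (trades : List (List (String × String))), Dom_analyze_by_streak_position trades → Pre_analyze_by_streak_position trades → Spec_analyze_by_streak_position trades (analyze_by_streak_position trades)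

-- ===== LEMMAS AND PROOFS =====

-- the within-run bumps j, j+1, …, j+k-1 as a structural recursion
def pvRangeBump (w : Bool) : PySem.Dict String (Int × Int) → Int → Nat → PySem.Dict String (Int × Int)
  | d, _, 0 => d
  | d, j, k + 1 => pvRangeBump w (pvBump d (pvKey w (min j 5)) w) (j + 1) k

lemma pvFoldRange (w : Bool) : ∀ (k : Nat) (j : Int) (d : PySem.Dict String (Int × Int)),
    (PySem.List.pyRange j (j + (k : Int)) 1).foldl (fun d i => pvBump d (pvKey w (min i 5)) w) d
      = pvRangeBump w d j k := by
  intro k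
  induction k with
  | zero => intro j d; simp [PySem.List.pyRange_one_eq_nil, pvRangeBump]
  | succ n ih =>
      intro j d
      rw [PySem.List.pyRange_one_cons (by push_cast; omega)]
      have h : j + ((n : Int) + 1) = (j + 1) + (n : Int) := by ring
      simp only [List.foldl_cons]
      push_cast
      rw [h, ih]
      rfl

lemma pvStepCont (d : PySem.Dict String (Int × Int)) (w : Bool) (j : Int) (hj : 1 ≤ j)
    (t : List (String × String)) (hwt : pvWon t = w) :
    pvStepA (d, if w then j else -j) t
      = (pvBump d (pvKey w (min j 5)) w, if w then j + 1 else -(j + 1)) := by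
  cases w with
  | true => simp [pvStepA, hwt, show (0:Int) < j by omega]
  | false =>
      have habs : |(-j)| = j := by rw [abs_neg]; exact abs_of_nonneg (by omega)
      simp [pvStepA, hwt, habs, show ¬(j < (0:Int)) by omega, show (0:Int) < j by omega]
      omega

lemma pvStepBreak (d : PySem.Dict String (Int × Int)) (w : Bool) (j : Int) (hj : 1 ≤ j)
    (t : List (String × String)) (hwt : pvWon t = !w) :
    pvStepA (d, if w then j else -j) t
      = (pvBump d (pvKey w (min j 5)) (pvWon t), if pvWon t then 1 else -1) := by
  cases w with
  | true => simp [pvStepA, hwt, show (0:Int) < j by omega, show ¬(j < (0:Int)) by omega]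
  | false =>
      have habs : |(-j)| = j := by rw [abs_neg]; exact abs_of_nonneg (by omega)
      simp [pvStepA, hwt, habs, show ¬(j < (0:Int)) by omega, show (0:Int) < j by omega]

lemma pvMain2 : ∀ (rest : List (List (String × String))) (w : Bool) (j : Int), 1 ≤ j →
    ∀ d, (rest.foldl pvStepA (d, if w then j else -j)).1
      = pvBLoop (some (w, j + (pvRunLen w rest : Int))) (rest.drop (pvRunLen w rest))
          (pvRangeBump w d j (pvRunLen w rest)) := by
  intro rest
  induction rest with
  | nil =>
      intro w j hj d
      rw [pvBLoop.eq_def]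
      simp [pvRunLen, pvRangeBump]
  | cons t r ih =>
      intro w j hj d
      by_cases hwt : pvWon t = w
      · -- the run continues through t
        have hrl : pvRunLen w (t :: r) = pvRunLen w r + 1 := by
          simp [pvRunLen, hwt]
        rw [hrl]
        simp only [List.foldl_cons, List.drop_succ_cons]
        rw [pvStepCont d w j hj t hwt, ih w (j + 1) (by omega)]
        have hc : j + ((pvRunLen w r : Int) + 1) = j + 1 + (pvRunLen w r : Int) := by ring
        push_cast
        rw [hc]
        rfl
      · -- t breaks the run: a new run starts at t
        have hwt' : pvWon t = !w := by cases w <;> cases h : pvWon t <;> simp_all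
        have hrl : pvRunLen w (t :: r) = 0 := by
          simp [pvRunLen, hwt']
        rw [hrl]
        simp only [Nat.cast_zero, add_zero, List.drop_zero]
        rw [pvBLoop.eq_def]
        simp only [pvRangeBump]
        rw [pvFoldRange (pvWon t) (pvRunLen (pvWon t) r) 1]
        simp only [List.foldl_cons]
        rw [pvStepBreak d w j hj t hwt']
        exact ih (pvWon t) 1 (by omega) (pvBump d (pvKey w (min j 5)) (pvWon t)) ▸ rfl

lemma pvMain1 : ∀ (trades : List (List (String × String))) (d : PySem.Dict String (Int × Int)),
    (trades.foldl pvStepA (d, 0)).1 = pvBLoop none trades d := by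
  intro trades d
  cases trades with
  | nil => rw [pvBLoop]; rfl
  | cons t rest =>
      rw [pvBLoop.eq_def]
      simp only []
      rw [pvFoldRange (pvWon t) (pvRunLen (pvWon t) rest) 1]
      simp only [List.foldl_cons]
      have hstep : pvStepA (d, 0) t
          = (pvBump d "first_trade" (pvWon t), if pvWon t then 1 else -1) := by
        simp [pvStepA]
      rw [hstep]
      rw [pvMain2 rest (pvWon t) 1 (by omega) (pvBump d "first_trade" (pvWon t))]

-- ===== VERDICT (by name: the statement is the Claim_ definition above) =====
theorem analyze_by_streak_position_spec : Claim_equal_analyze_by_streak_position := by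
  intro trades _ _
  unfold Spec_analyze_by_streak_position analyze_by_streak_position analyze_by_streak_position_alt
  cases trades with
  | nil => rw [pvBLoop]; rfl
  | cons t rest => rw [if_neg (by simp), pvMain1]
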